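-- pv_equiv track=rewrite | github.com/Zygilion/domain_suggesting | domain_parser.py | parse_domain_suggestions
-- ===== SOURCE A (Python) =====
-- from typing import List
--
-- def parse_domain_suggestions(content: str) -> List[str]:
--     """Parse domain suggestions from model output"""
--     lines = content.split('\n')
--     domains = []
--
--     for line in lines:
--         line = line.strip()
--         # Look for lines that might contain domains
--         if '.' in line and len(line) > 3:
--             # Extract potential domains (basic cleaning)
--             words = line.split()
--             for word in words:
--                 if '.' in word and len(word) > 3:
--                     # Basic domain validation
--                     if word.count('.') >= 1 and not word.startswith('.') and not word.endswith('.'):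
--                         domains.append(word.lower())
--
--     # If no domains found in expected format, return the raw content split by common separators
--     if not domains:
--         # Fallback: split content and look for domain-like strings
--         content_clean = content.replace(',', '\n').replace(';', '\n')
--         domains = [line.strip() for line in content_clean.split('\n') if line.strip()]
--
--     return domains
-- ===== SOURCE B (Python) =====
-- def _flush(domains, token):
--     """Append token (lowercased) if it looks like a domain."""
--     if len(token) > 3 and '.' in token and not token.startswith('.') and not token.endswith('.'):
--         domains.append(token.lower())
--
--
-- def parse_domain_suggestions(content):
--     """Parse domain suggestions from model output (single char-level scan)."""
--     domains = []
--     token = ''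
--     for ch in content:
--         if ch.isspace():
--             _flush(domains, token)
--             token = ''
--         else:
--             token += ch
--     _flush(domains, token)
--     if not domains:
--         cleaned = content.replace(',', '\n').replace(';', '\n')
--         domains = [ln.strip() for ln in cleaned.split('\n') if ln.strip()]
--     return domains
-- ===== Notes on version B (the rewrite author's own statement) =====
-- stated objective: alternative
-- what changed: Replaces A's nested split-into-lines/strip/split-into-words loops (with a redundant line-level pre-filter) by a single character-level scan that maintains the current whitespace-delimited token and flushes it through one domain test; the fallback branch is unchanged.
import Mathlib
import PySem

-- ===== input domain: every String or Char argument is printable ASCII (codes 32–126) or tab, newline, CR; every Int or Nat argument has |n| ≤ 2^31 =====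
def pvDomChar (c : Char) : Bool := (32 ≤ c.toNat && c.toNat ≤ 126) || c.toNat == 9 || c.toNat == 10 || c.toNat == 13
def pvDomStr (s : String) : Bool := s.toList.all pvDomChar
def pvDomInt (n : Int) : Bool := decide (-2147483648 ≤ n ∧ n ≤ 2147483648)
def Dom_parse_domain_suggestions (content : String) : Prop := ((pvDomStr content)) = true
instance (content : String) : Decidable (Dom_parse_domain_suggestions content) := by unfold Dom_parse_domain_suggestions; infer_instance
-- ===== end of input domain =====

-- B replaces A's nested line/word split-and-filter loops by a single character-level scan
-- (a whitespace-delimited token state machine); objective: alternative.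

-- ===== PORT A =====
-- the body of A's inner `for word in words` loop
def pvWordStep (domains : List String) (word : List Char) : List String :=
  if PySem.Chars.isIn ['.'] word && decide (3 < PySem.Chars.len word) then
    if decide (1 ≤ PySem.Chars.count word ['.']) && !PySem.Chars.startswith word ['.'] && !PySem.Chars.endswith word ['.'] then
      domains ++ [String.ofList (PySem.Chars.lower word)]
    else domains
  else domains

-- the body of A's outer `for line in lines` loop
def pvLineStep (domains : List String) (line : List Char) : List String :=
  let line := PySem.Chars.strip line
  if PySem.Chars.isIn ['.'] line && decide (3 < PySem.Chars.len line) then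
    (PySem.Chars.split₀ line).foldl pvWordStep domains
  else domains

def parse_domain_suggestions (content : String) : List String :=
  let lines := PySem.Chars.splitOn content.toList ['\n']
  let domains := lines.foldl pvLineStep ([] : List String)
  if domains.isEmpty then
    let clean := PySem.Chars.replace (PySem.Chars.replace content.toList [','] ['\n']) [';'] ['\n']
    (((PySem.Chars.splitOn clean ['\n']).map PySem.Chars.strip).filter (fun t => !t.isEmpty)).map String.ofList
  else domains

-- ===== PORT B =====
-- Source B's token test
def pvLooksLikeDomain (w : List Char) : Bool :=
  decide (3 < PySem.Chars.len w) && PySem.Chars.isIn ['.'] w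
    && !PySem.Chars.startswith w ['.'] && !PySem.Chars.endswith w ['.']

-- Source B's _flush helper
def pvFlush (domains : List String) (token : List Char) : List String :=
  if pvLooksLikeDomain token then domains ++ [String.ofList (PySem.Chars.lower token)] else domains

-- the body of Source B's `for ch in content` loop; state = (domains, token)
def pvScanStep (st : List String × List Char) (ch : Char) : List String × List Char :=
  if PySem.Chars.isspace ch then (pvFlush st.1 st.2, ([] : List Char))
  else (st.1, st.2 ++ [ch])

def parse_domain_suggestions_alt (content : String) : List String :=
  let st := content.toList.foldl pvScanStep (([] : List String), ([] : List Char))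
  let domains := pvFlush st.1 st.2
  if domains.isEmpty then
    let clean := PySem.Chars.replace (PySem.Chars.replace content.toList [','] ['\n']) [';'] ['\n']
    (((PySem.Chars.splitOn clean ['\n']).map PySem.Chars.strip).filter (fun t => !t.isEmpty)).map String.ofList
  else domains

-- ===== PRECONDITION & SPEC =====
def Spec_parse_domain_suggestions (content : String) (out : List String) : Prop := out = parse_domain_suggestions_alt content
instance (content : String) (out : List String) : Decidable (Spec_parse_domain_suggestions content out) := by unfold Spec_parse_domain_suggestions; infer_instance

-- ===== CLAIM (what is proved, stated in full; the proofs are below) =====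
def Claim_equal_parse_domain_suggestions : Prop := ∀ (content : String), Dom_parse_domain_suggestions content → Spec_parse_domain_suggestions content (parse_domain_suggestions content)

-- ===== LEMMAS AND PROOFS =====

-- the per-token output of both programs
def pvEmit (w : List Char) : String := String.ofList (PySem.Chars.lower w)
theorem pv_go_acc (s : List Char) : ∀ (cur : List Char) (acc : List (List Char)),
    PySem.Chars.split₀.go s cur acc = acc.reverse ++ PySem.Chars.split₀.go s cur [] := by
  induction s with
  | nil => intro cur acc; simp [PySem.Chars.split₀.go]; split <;> simp
  | cons c rest ih =>
    intro cur acc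
    rw [PySem.Chars.split₀.go, PySem.Chars.split₀.go]
    by_cases hc : PySem.Chars.isspace c
    · simp only [hc, if_true]
      by_cases hcur : cur.isEmpty
      · simp [hcur, ih [] acc]
      · simp only [hcur]
        rw [ih [] (cur.reverse :: acc), ih [] [cur.reverse]]
        simp
    · simp only [hc]
      exact ih (c :: cur) acc

theorem pv_W_nil (cur : List Char) :
    PySem.Chars.split₀.go [] cur [] = if cur.isEmpty then [] else [cur.reverse] := by
  rw [PySem.Chars.split₀.go]; split <;> simp

theorem pv_W_space {c : Char} (hc : PySem.Chars.isspace c = true) (a b cur : List Char) :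
    PySem.Chars.split₀.go (a ++ c :: b) cur [] =
      PySem.Chars.split₀.go a cur [] ++ PySem.Chars.split₀.go b [] [] := by
  induction a generalizing cur with
  | nil =>
    simp only [List.nil_append]
    rw [pv_W_nil, PySem.Chars.split₀.go]
    by_cases hcur : cur.isEmpty
    · simp [hc, hcur]
    · simp only [hc, if_true, hcur]
      rw [pv_go_acc b [] [cur.reverse]]
      simp
  | cons x a' ih =>
    rw [List.cons_append, PySem.Chars.split₀.go, PySem.Chars.split₀.go]
    by_cases hx : PySem.Chars.isspace x
    · simp only [hx, if_true]
      by_cases hcur : cur.isEmpty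
      · simp only [hcur, if_true]; exact ih []
      · simp only [hcur]
        rw [pv_go_acc (a' ++ c :: b) [] [cur.reverse], pv_go_acc a' [] [cur.reverse], ih []]
        simp
    · simp only [hx]
      exact ih (x :: cur)

theorem pv_W_lstrip (s : List Char) :
    PySem.Chars.split₀.go (List.dropWhile PySem.Chars.isspace s) [] [] = PySem.Chars.split₀.go s [] [] := by
  induction s with
  | nil => rfl
  | cons c rest ih =>
    by_cases hc : PySem.Chars.isspace c
    · rw [List.dropWhile_cons_of_pos hc, ih, PySem.Chars.split₀.go]
      simp [hc]
    · rw [List.dropWhile_cons_of_neg (by simp [hc])]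

theorem pv_W_allspace (t : List Char) (h : ∀ c ∈ t, PySem.Chars.isspace c = true) :
    PySem.Chars.split₀.go t [] [] = [] := by
  induction t with
  | nil => rfl
  | cons c rest ih =>
    rw [PySem.Chars.split₀.go]
    simp only [h c (by simp), if_true, List.isEmpty_nil]
    exact ih (fun c hc => h c (by simp [hc]))

theorem pv_W_trailing (t : List Char) (h : ∀ c ∈ t, PySem.Chars.isspace c = true) (s : List Char) :
    ∀ cur, PySem.Chars.split₀.go (s ++ t) cur [] = PySem.Chars.split₀.go s cur [] := by
  induction s with
  | nil =>
    intro cur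
    simp only [List.nil_append]
    rw [pv_W_nil]
    induction t with
    | nil => rw [pv_W_nil]
    | cons c t' iht =>
      rw [PySem.Chars.split₀.go]
      simp only [h c (by simp), if_true]
      by_cases hcur : cur.isEmpty
      · rw [pv_W_allspace t' (fun c hc => h c (by simp [hc]))]
        simp [hcur]
      · rw [pv_go_acc t' [] [cur.reverse], pv_W_allspace t' (fun c hc => h c (by simp [hc]))]
        simp [hcur]
  | cons x s' ih =>
    intro cur
    rw [List.cons_append, PySem.Chars.split₀.go, PySem.Chars.split₀.go]
    by_cases hx : PySem.Chars.isspace x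
    · simp only [hx, if_true]
      by_cases hcur : cur.isEmpty
      · simp only [hcur, if_true]; exact ih []
      · simp only [hcur]
        rw [pv_go_acc (s' ++ t) [] [cur.reverse], pv_go_acc s' [] [cur.reverse], ih []]
    · simp only [hx]
      exact ih (x :: cur)

theorem pv_W_strip (s : List Char) :
    PySem.Chars.split₀.go (PySem.Chars.strip s) [] [] = PySem.Chars.split₀.go s [] [] := by
  unfold PySem.Chars.strip PySem.Chars.rstrip PySem.Chars.lstrip
  set u := List.dropWhile PySem.Chars.isspace s with hu
  have hsplit : u = (List.dropWhile PySem.Chars.isspace u.reverse).reverse ++ (List.takeWhile PySem.Chars.isspace u.reverse).reverse := by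
    rw [← List.reverse_append, List.takeWhile_append_dropWhile, List.reverse_reverse]
  calc PySem.Chars.split₀.go (List.dropWhile PySem.Chars.isspace u.reverse).reverse [] []
      = PySem.Chars.split₀.go ((List.dropWhile PySem.Chars.isspace u.reverse).reverse ++ (List.takeWhile PySem.Chars.isspace u.reverse).reverse) [] [] := by
        rw [pv_W_trailing _ (fun c hc => List.mem_takeWhile_imp (by simpa using hc)) _ []]
    _ = PySem.Chars.split₀.go u [] [] := by rw [← hsplit]
    _ = PySem.Chars.split₀.go s [] [] := by rw [hu]; exact pv_W_lstrip s

theorem pv_W_facts (s : List Char) : ∀ (cur w : List Char), w ∈ PySem.Chars.split₀.go s cur [] →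
    w.length ≤ s.length + cur.length ∧ (∀ c ∈ w, c ∈ s ∨ c ∈ cur) := by
  induction s with
  | nil =>
    intro cur w hw
    rw [pv_W_nil] at hw
    rcases (by split at hw <;> simp_all : w = cur.reverse) with rfl
    exact ⟨by simp, fun c hc => Or.inr (by simpa using hc)⟩
  | cons x rest ih =>
    intro cur w hw
    rw [PySem.Chars.split₀.go] at hw
    by_cases hx : PySem.Chars.isspace x
    · simp only [hx, if_true] at hw
      by_cases hcur : cur.isEmpty
      · simp only [hcur, if_true] at hw
        obtain ⟨h1, h2⟩ := ih [] w hw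
        refine ⟨?_, fun c hc => ?_⟩
        · simp only [List.length_nil] at h1
          simp only [List.length_cons]
          omega
        · rcases h2 c hc with h | h
          · exact Or.inl (by simp [h])
          · simp at h
      · simp only [hcur] at hw
        rw [pv_go_acc rest [] [cur.reverse]] at hw
        simp only [List.reverse_cons, List.reverse_nil, List.nil_append] at hw
        rcases (by simpa using hw : w = cur.reverse ∨ w ∈ PySem.Chars.split₀.go rest [] []) with h | h
        · subst h
          refine ⟨?_, fun c hc => Or.inr (by simpa using hc)⟩
          simp only [List.length_reverse, List.length_cons]
          omega
        · obtain ⟨h1, h2⟩ := ih [] w h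
          refine ⟨?_, fun c hc => ?_⟩
          · simp only [List.length_nil] at h1
            simp only [List.length_cons]
            omega
          · rcases h2 c hc with h | h
            · exact Or.inl (by simp [h])
            · simp at h
    · simp only [hx] at hw
      obtain ⟨h1, h2⟩ := ih (x :: cur) w hw
      refine ⟨?_, fun c hc => ?_⟩
      · simp only [List.length_cons] at h1 ⊢
        omega
      · rcases h2 c hc with h | h
        · exact Or.inl (by simp [h])
        · rcases List.mem_cons.mp h with h | h
          · exact Or.inl (by simp [h])
          · exact Or.inr h

theorem pv_splitOn_acc (sep : List Char) (fuel : Nat) : ∀ (l cur : List Char) (acc : List (List Char)),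
    PySem.Chars.splitOn.go sep fuel l cur acc = acc.reverse ++ PySem.Chars.splitOn.go sep fuel l cur [] := by
  induction fuel with
  | zero => intro l cur acc; rw [PySem.Chars.splitOn.go, PySem.Chars.splitOn.go]; simp
  | succ fuel ih =>
    intro l cur acc
    cases l with
    | nil =>
      have h1 : ∀ acc : List (List Char), PySem.Chars.splitOn.go sep (fuel + 1) [] cur acc = (cur.reverse :: acc).reverse := fun _ => rfl
      rw [h1, h1]
      simp
    | cons c rest =>
      rw [PySem.Chars.splitOn.go, PySem.Chars.splitOn.go]
      by_cases hp : sep.isPrefixOf (c :: rest)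
      · simp only [hp, if_true]
        rw [ih _ [] (cur.reverse :: acc), ih _ [] [cur.reverse]]
        simp
      · simp only [hp]
        exact ih rest (c :: cur) acc

theorem pv_flatten (fuel : Nat) : ∀ (l cur : List Char), l.length ≤ fuel →
    PySem.Chars.split₀.go (cur.reverse ++ l) [] [] =
      (PySem.Chars.splitOn.go ['\n'] fuel l cur []).flatMap (fun x => PySem.Chars.split₀.go x [] []) := by
  induction fuel with
  | zero =>
    intro l cur hl
    have hnil : l = [] := List.eq_nil_of_length_eq_zero (Nat.le_zero.mp hl)
    subst hnil
    rw [PySem.Chars.splitOn.go]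
    simp
  | succ fuel ih =>
    intro l cur hl
    cases l with
    | nil =>
      have h1 : PySem.Chars.splitOn.go ['\n'] (fuel + 1) [] cur [] = [cur.reverse] := rfl
      rw [h1]
      simp
    | cons c rest =>
      have hrest : rest.length ≤ fuel := by
        simp only [List.length_cons] at hl; omega
      rw [PySem.Chars.splitOn.go]
      by_cases hc : c = '\n'
      · subst hc
        have hp : List.isPrefixOf ['\n'] ('\n' :: rest) = true := by
          simp [List.isPrefixOf]
        simp only [hp, if_true, List.length_singleton, List.drop_succ_cons, List.drop_zero]
        rw [pv_splitOn_acc ['\n'] fuel rest [] [cur.reverse]]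
        have hrec := ih rest [] hrest
        simp only [List.reverse_nil, List.nil_append] at hrec
        rw [pv_W_space (by decide) cur.reverse rest [], hrec]
        simp
      · have hp : List.isPrefixOf ['\n'] (c :: rest) = false := by
          simp [List.isPrefixOf]
          exact fun h => hc h.symm
        have hsw : cur.reverse ++ c :: rest = (c :: cur).reverse ++ rest := by simp
        rw [hsw, ih rest (c :: cur) hrest]
        simp [hp]

theorem pv_count_go_mono (sub : List Char) (fuel : Nat) : ∀ (l : List Char) (acc : Nat),
    acc ≤ PySem.Chars.count.go sub fuel l acc := by
  induction fuel with
  | zero => intro l acc; rw [PySem.Chars.count.go]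
  | succ fuel ih =>
    intro l acc
    cases l with
    | nil =>
      have h1 : PySem.Chars.count.go sub (fuel + 1) [] acc = acc := rfl
      rw [h1]
    | cons c rest =>
      rw [PySem.Chars.count.go]
      by_cases hp : sub.isPrefixOf (c :: rest)
      · simp only [hp, if_true]
        exact Nat.le_trans (Nat.le_succ acc) (ih _ (acc + 1))
      · simp only [hp]
        exact ih rest acc

theorem pv_count_go_pos (fuel : Nat) : ∀ (l : List Char) (acc : Nat), '.' ∈ l → l.length ≤ fuel →
    acc + 1 ≤ PySem.Chars.count.go ['.'] fuel l acc := by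
  induction fuel with
  | zero =>
    intro l acc hmem hl
    have : l = [] := List.eq_nil_of_length_eq_zero (Nat.le_zero.mp hl)
    subst this; simp at hmem
  | succ fuel ih =>
    intro l acc hmem hl
    cases l with
    | nil => simp at hmem
    | cons c rest =>
      rw [PySem.Chars.count.go]
      by_cases hp : List.isPrefixOf ['.'] (c :: rest)
      · simp only [hp, if_true]
        exact pv_count_go_mono ['.'] fuel _ (acc + 1)
      · simp only [hp]
        have hc : c ≠ '.' := by
          intro h; subst h
          exact hp (by simp [List.isPrefixOf])
        have : '.' ∈ rest := by
          rcases List.mem_cons.mp hmem with h | h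
          · exact absurd h.symm hc
          · exact h
        exact ih rest acc this (by simp at hl; omega)

theorem pv_count_pos (w : List Char) (h : PySem.Chars.isIn ['.'] w = true) :
    1 ≤ PySem.Chars.count w ['.'] := by
  have hmem : '.' ∈ w := by
    have := (PySem.Chars.isIn_iff_infix ['.'] w).mp h
    rcases this with ⟨s, t, hst⟩
    rw [← hst]; simp
  unfold PySem.Chars.count
  simp only [List.isEmpty_cons]
  simpa using pv_count_go_pos w.length w 0 hmem (le_refl _)

theorem pv_mem_singleton_infix {c : Char} {w : List Char} (h : c ∈ w) : [c] <:+: w := by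
  rcases List.mem_iff_append.mp h with ⟨s, t, rfl⟩
  exact ⟨s, t, by simp⟩

theorem pv_wordStep_eq (d : List String) (w : List Char) :
    pvWordStep d w = if pvLooksLikeDomain w then d ++ [pvEmit w] else d := by
  unfold pvWordStep pvLooksLikeDomain pvEmit
  by_cases h1 : PySem.Chars.isIn ['.'] w
  · have h2 := pv_count_pos w h1
    by_cases h2l : 3 < PySem.Chars.len w <;>
      by_cases hsw : PySem.Chars.startswith w ['.'] <;>
        by_cases hew : PySem.Chars.endswith w ['.'] <;>
          simp [h1, h2, hsw, hew]
  · simp [h1]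

theorem pv_foldl_wordStep (ws : List (List Char)) (d : List String) :
    ws.foldl pvWordStep d = d ++ (ws.filter pvLooksLikeDomain).map pvEmit := by
  have hfun : pvWordStep = fun d w => if pvLooksLikeDomain w then d ++ [pvEmit w] else d :=
    funext fun d => funext fun w => pv_wordStep_eq d w
  rw [hfun]
  exact PySem.List.foldl_append_if pvLooksLikeDomain pvEmit ws d

theorem pv_filter_nil_of_not_cond (l : List Char)
    (hcond : ¬((PySem.Chars.isIn ['.'] (PySem.Chars.strip l) && decide (3 < PySem.Chars.len (PySem.Chars.strip l))) = true)) :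
    (PySem.Chars.split₀.go l [] []).filter pvLooksLikeDomain = [] := by
  rw [List.filter_eq_nil_iff]
  intro w hw
  rw [← pv_W_strip] at hw
  obtain ⟨hlen, hmem⟩ := pv_W_facts (PySem.Chars.strip l) [] w hw
  simp only [List.length_nil, Nat.add_zero] at hlen
  intro hok
  apply hcond
  unfold pvLooksLikeDomain at hok
  simp only [Bool.and_eq_true, decide_eq_true_eq] at hok
  obtain ⟨⟨⟨hlw, hin⟩, _⟩, _⟩ := hok
  have hdot : '.' ∈ w := by
    rcases (PySem.Chars.isIn_iff_infix ['.'] w).mp hin with ⟨s, t, hst⟩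
    rw [← hst]; simp
  have hdot' : '.' ∈ PySem.Chars.strip l := by
    rcases hmem '.' hdot with h | h
    · exact h
    · simp at h
  simp only [Bool.and_eq_true, decide_eq_true_eq]
  refine ⟨(PySem.Chars.isIn_iff_infix _ _).mpr (pv_mem_singleton_infix hdot'), ?_⟩
  rw [PySem.Chars.len_eq] at hlw ⊢
  have : w.length ≤ (PySem.Chars.strip l).length := hlen
  omega

theorem pv_lineStep_eq (d : List String) (l : List Char) :
    pvLineStep d l = d ++ ((PySem.Chars.split₀.go l [] []).filter pvLooksLikeDomain).map pvEmit := by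
  unfold pvLineStep
  by_cases hcond : (PySem.Chars.isIn ['.'] (PySem.Chars.strip l) && decide (3 < PySem.Chars.len (PySem.Chars.strip l))) = true
  · simp only [hcond, if_true]
    have hsp : PySem.Chars.split₀ (PySem.Chars.strip l) = PySem.Chars.split₀.go l [] [] := by
      unfold PySem.Chars.split₀
      exact pv_W_strip l
    rw [hsp, pv_foldl_wordStep]
  · simp only [hcond]
    rw [pv_filter_nil_of_not_cond l hcond]
    simp

theorem pv_A_domains (content : String) :
    (PySem.Chars.splitOn content.toList ['\n']).foldl pvLineStep ([] : List String)
    = ((PySem.Chars.split₀.go content.toList [] []).filter pvLooksLikeDomain).map pvEmit := by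
  have hfun : pvLineStep = fun d l => d ++ ((PySem.Chars.split₀.go l [] []).filter pvLooksLikeDomain).map pvEmit :=
    funext fun d => funext fun l => pv_lineStep_eq d l
  rw [hfun, PySem.List.foldl_append_eq_flatMap]
  have hflat : PySem.Chars.split₀.go content.toList [] [] =
      (PySem.Chars.splitOn content.toList ['\n']).flatMap (fun x => PySem.Chars.split₀.go x [] []) := by
    unfold PySem.Chars.splitOn
    simpa using pv_flatten (content.toList.length + 1) content.toList [] (by omega)
  rw [hflat, List.filter_flatMap, List.map_flatMap]
  simp

theorem pv_scan (s : List Char) : ∀ (d : List String) (tok : List Char),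
    pvFlush (s.foldl pvScanStep (d, tok)).1 (s.foldl pvScanStep (d, tok)).2
    = d ++ ((PySem.Chars.split₀.go s tok.reverse []).filter pvLooksLikeDomain).map pvEmit := by
  induction s with
  | nil =>
    intro d tok
    simp only [List.foldl_nil]
    rw [pv_W_nil]
    by_cases htok : tok = []
    · subst htok
      simp [pvFlush, pvLooksLikeDomain, PySem.Chars.len]
    · have : tok.reverse.isEmpty = false := by simp [htok]
      simp only [this, Bool.false_eq_true, if_false, List.reverse_reverse]
      unfold pvFlush pvEmit
      by_cases hok : pvLooksLikeDomain tok <;> simp [hok]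
  | cons c rest ih =>
    intro d tok
    simp only [List.foldl_cons]
    rw [PySem.Chars.split₀.go]
    by_cases hc : PySem.Chars.isspace c
    · have hstep : pvScanStep (d, tok) c = (pvFlush d tok, []) := by
        unfold pvScanStep; simp [hc]
      rw [hstep]
      have hrec := ih (pvFlush d tok) []
      simp only [List.reverse_nil] at hrec
      rw [hrec]
      by_cases htok : tok = []
      · subst htok
        simp [hc, pvFlush, pvLooksLikeDomain, PySem.Chars.len]
      · have hne : tok.reverse.isEmpty = false := by simp [htok]
        simp only [hc, if_true, hne, Bool.false_eq_true, if_false]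
        rw [pv_go_acc rest [] [tok.reverse.reverse]]
        simp only [List.reverse_reverse, List.reverse_cons, List.reverse_nil, List.nil_append]
        rw [List.filter_append, List.map_append]
        unfold pvFlush
        by_cases hok : pvLooksLikeDomain tok <;> simp [hok, pvEmit]
    · have hstep : pvScanStep (d, tok) c = (d, tok ++ [c]) := by
        unfold pvScanStep; simp [hc]
      rw [hstep]
      have hrec := ih d (tok ++ [c])
      simp only [List.reverse_append, List.reverse_singleton, List.singleton_append] at hrec
      rw [hrec]
      simp [hc]

-- ===== VERDICT (by name: the statement is the Claim_ definition above) =====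
theorem parse_domain_suggestions_spec : Claim_equal_parse_domain_suggestions := by
  intro content _
  unfold Spec_parse_domain_suggestions parse_domain_suggestions parse_domain_suggestions_alt
  have h := pv_scan content.toList [] []
  simp only [List.reverse_nil] at h
  simp only [pv_A_domains content, h, List.nil_append]
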